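-- pv_equiv track=rewrite | github.com/uchicago-capp-30320/ShoulderToShoulder | playground.py | parse_num_participants_pref
-- ===== SOURCE A (Python) =====
-- def parse_num_participants_pref(num_participants):
--     """
--     Helper function to parse user's preferred number of participants data formatting and standardizing
--     it into the PanelUserPreferencess row
--
--     Inputs:
--         num_participants (list): The user's preferred number of participants
--
--     Returns:
--         num_participants_data (dict): dictionary of user's preferred number of participants data
--     """
--     assert type(num_participants) == list, "num_participants must be a list"
--
--     num_participants_map = {
--         "1-5": "pref_num_particip_1to5",
--         "5-10": "pref_num_particip_5to10",
--         "10-15": "pref_num_particip_10to15",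
--         "15+": "pref_num_particip_15p"
--     }
--     num_participants_data = {}
--     for num_participant in num_participants_map:
--         num_participants_data[num_participants_map[num_participant]] = num_participant in num_participants
--
--     return(num_participants_data)
-- ===== SOURCE B (Python) =====
-- def parse_num_participants_pref(num_participants):
--     assert type(num_participants) == list, "num_participants must be a list"
--
--     inverse_map = {
--         "1-5": "pref_num_particip_1to5",
--         "5-10": "pref_num_particip_5to10",
--         "10-15": "pref_num_particip_10to15",
--         "15+": "pref_num_particip_15p",
--     }
--     num_participants_data = {flag: False for flag in inverse_map.values()}
--     for p in num_participants:
--         if p in inverse_map: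
--             num_participants_data[inverse_map[p]] = True
--
--     return num_participants_data
-- ===== Notes on version B (the rewrite author's own statement) =====
-- stated objective: idiomatic
-- what changed: Instead of scanning the whole input list once per flag (membership test per map key), B pre-seeds all four flags to False and makes a single pass over the input, flipping flags via an inverse lookup dict.
import Mathlib
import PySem

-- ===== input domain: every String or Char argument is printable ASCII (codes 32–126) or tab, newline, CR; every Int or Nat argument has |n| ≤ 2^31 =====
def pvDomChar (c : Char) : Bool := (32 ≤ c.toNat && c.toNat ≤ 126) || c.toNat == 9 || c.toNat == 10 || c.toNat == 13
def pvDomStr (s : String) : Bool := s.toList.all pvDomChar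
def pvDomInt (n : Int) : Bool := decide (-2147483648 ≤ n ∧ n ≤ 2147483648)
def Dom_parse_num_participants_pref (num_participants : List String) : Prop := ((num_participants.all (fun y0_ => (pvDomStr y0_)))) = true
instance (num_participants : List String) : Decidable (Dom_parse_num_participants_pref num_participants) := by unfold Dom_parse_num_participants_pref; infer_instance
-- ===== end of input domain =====

-- B replaces A's per-flag scan of the input list by one pass over the input with an inverse lookup dict (idiomatic; same observable result).

-- ===== PORT A =====
-- num_participants_map, as a key → value association list (iteration over a dict visits keys in insertion order)
def pvMapA : List (String × String) :=
  [("1-5", "pref_num_particip_1to5"),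
   ("5-10", "pref_num_particip_5to10"),
   ("10-15", "pref_num_particip_10to15"),
   ("15+", "pref_num_particip_15p")]

def parse_num_participants_pref (num_participants : List String) : List (String × Bool) :=
  -- for num_participant in num_participants_map: data[map[num_participant]] = num_participant in num_participants
  (pvMapA.foldl
    (fun d kv => d.insert kv.2 (num_participants.contains kv.1))
    (PySem.Dict.empty : PySem.Dict String Bool)).items

-- ===== PORT B =====
def pvInvB : PySem.Dict String String :=
  PySem.Dict.ofList
    [("1-5", "pref_num_particip_1to5"),
     ("5-10", "pref_num_particip_5to10"),
     ("10-15", "pref_num_particip_10to15"),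
     ("15+", "pref_num_particip_15p")]

-- loop body: if p in inverse_map: data[inverse_map[p]] = True
def pvStepB (d : PySem.Dict String Bool) (p : String) : PySem.Dict String Bool :=
  match pvInvB.get? p with
  | some f => d.insert f true
  | none => d

def parse_num_participants_pref_alt (num_participants : List String) : List (String × Bool) :=
  -- data = {flag: False for flag in inverse_map.values()}; for p in l: if p in inverse_map: data[inverse_map[p]] = True
  (num_participants.foldl pvStepB
    (PySem.Dict.ofList (pvInvB.values.map (fun f => (f, false))))).items

-- ===== PRECONDITION & SPEC =====
def Spec_parse_num_participants_pref (num_participants : List String) (out : List (String × Bool)) : Prop := out = parse_num_participants_pref_alt num_participants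
instance (num_participants : List String) (out : List (String × Bool)) : Decidable (Spec_parse_num_participants_pref num_participants out) := by unfold Spec_parse_num_participants_pref; infer_instance

-- ===== CLAIM (what is proved, stated in full; the proofs are below) =====
def Claim_equal_parse_num_participants_pref : Prop := ∀ (num_participants : List String), Dom_parse_num_participants_pref num_participants → Spec_parse_num_participants_pref num_participants (parse_num_participants_pref num_participants)

-- ===== LEMMAS AND PROOFS =====

lemma pvStep_hit (d : PySem.Dict String Bool) (k f : String)
    (h : pvInvB.get? k = some f) : pvStepB d k = d.insert f true := by
  unfold pvStepB; rw [h]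

lemma pvStep_miss (d : PySem.Dict String Bool) (k : String)
    (h : pvInvB.get? k = none) : pvStepB d k = d := by
  unfold pvStepB; rw [h]

-- insert on the 4-flag state, one lemma per flag
lemma pvIns1 (b1 b2 b3 b4 : Bool) :
    (PySem.Dict.mk [("pref_num_particip_1to5", b1), ("pref_num_particip_5to10", b2),
      ("pref_num_particip_10to15", b3), ("pref_num_particip_15p", b4)]).insert "pref_num_particip_1to5" true =
    PySem.Dict.mk [("pref_num_particip_1to5", true), ("pref_num_particip_5to10", b2),
      ("pref_num_particip_10to15", b3), ("pref_num_particip_15p", b4)] := by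
  simp [PySem.Dict.insert]

lemma pvIns2 (b1 b2 b3 b4 : Bool) :
    (PySem.Dict.mk [("pref_num_particip_1to5", b1), ("pref_num_particip_5to10", b2),
      ("pref_num_particip_10to15", b3), ("pref_num_particip_15p", b4)]).insert "pref_num_particip_5to10" true =
    PySem.Dict.mk [("pref_num_particip_1to5", b1), ("pref_num_particip_5to10", true),
      ("pref_num_particip_10to15", b3), ("pref_num_particip_15p", b4)] := by
  simp [PySem.Dict.insert]

lemma pvIns3 (b1 b2 b3 b4 : Bool) :
    (PySem.Dict.mk [("pref_num_particip_1to5", b1), ("pref_num_particip_5to10", b2),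
      ("pref_num_particip_10to15", b3), ("pref_num_particip_15p", b4)]).insert "pref_num_particip_10to15" true =
    PySem.Dict.mk [("pref_num_particip_1to5", b1), ("pref_num_particip_5to10", b2),
      ("pref_num_particip_10to15", true), ("pref_num_particip_15p", b4)] := by
  simp [PySem.Dict.insert]

lemma pvIns4 (b1 b2 b3 b4 : Bool) :
    (PySem.Dict.mk [("pref_num_particip_1to5", b1), ("pref_num_particip_5to10", b2),
      ("pref_num_particip_10to15", b3), ("pref_num_particip_15p", b4)]).insert "pref_num_particip_15p" true =
    PySem.Dict.mk [("pref_num_particip_1to5", b1), ("pref_num_particip_5to10", b2),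
      ("pref_num_particip_10to15", b3), ("pref_num_particip_15p", true)] := by
  simp [PySem.Dict.insert]

-- B's loop over the input, started from any 4-flag dict state, ends with each flag OR-ed with membership of its size-string.
lemma pvLoopB_shape (l : List String) (b1 b2 b3 b4 : Bool) :
    l.foldl pvStepB
      (PySem.Dict.mk [("pref_num_particip_1to5", b1), ("pref_num_particip_5to10", b2),
                      ("pref_num_particip_10to15", b3), ("pref_num_particip_15p", b4)]) =
    PySem.Dict.mk [("pref_num_particip_1to5", b1 || l.contains "1-5"),
                   ("pref_num_particip_5to10", b2 || l.contains "5-10"),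
                   ("pref_num_particip_10to15", b3 || l.contains "10-15"),
                   ("pref_num_particip_15p", b4 || l.contains "15+")] := by
  induction l generalizing b1 b2 b3 b4 with
  | nil => simp
  | cons p t ih =>
    simp only [List.foldl_cons, List.contains_cons]
    by_cases h1 : p = "1-5"
    · subst h1
      rw [pvStep_hit _ _ _ rfl, pvIns1, ih]; simp
    · by_cases h2 : p = "5-10"
      · subst h2
        rw [pvStep_hit _ _ _ rfl, pvIns2, ih]; simp
      · by_cases h3 : p = "10-15"
        · subst h3
          rw [pvStep_hit _ _ _ rfl, pvIns3, ih]; simp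
        · by_cases h4 : p = "15+"
          · subst h4
            rw [pvStep_hit _ _ _ rfl, pvIns4, ih]; simp
          · have hget : pvInvB.get? p = none := by
              simp [pvInvB, PySem.Dict.ofList, PySem.Dict.update, PySem.Dict.get?_insert,
                    h1, h2, h3, h4]
            rw [pvStep_miss _ _ hget, ih]
            have e1 : ("1-5" == p) = false := by rw [beq_eq_false_iff_ne]; exact fun h => h1 h.symm
            have e2 : ("5-10" == p) = false := by rw [beq_eq_false_iff_ne]; exact fun h => h2 h.symm
            have e3 : ("10-15" == p) = false := by rw [beq_eq_false_iff_ne]; exact fun h => h3 h.symm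
            have e4 : ("15+" == p) = false := by rw [beq_eq_false_iff_ne]; exact fun h => h4 h.symm
            simp [e1, e2, e3, e4]

-- ===== VERDICT (by name: the statement is the Claim_ definition above) =====
theorem parse_num_participants_pref_spec : Claim_equal_parse_num_participants_pref := by
  intro l _
  unfold Spec_parse_num_participants_pref parse_num_participants_pref parse_num_participants_pref_alt
  rw [show (PySem.Dict.ofList (pvInvB.values.map (fun f => (f, false)))) =
      PySem.Dict.mk [("pref_num_particip_1to5", false), ("pref_num_particip_5to10", false),
                     ("pref_num_particip_10to15", false), ("pref_num_particip_15p", false)] from rfl]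
  rw [pvLoopB_shape]
  simp [pvMapA, PySem.Dict.insert, PySem.Dict.empty]
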